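-- pv_equiv track=rewrite | github.com/krausondrej/crypto-ui | ADFGVX.py | sanitized_passwd
-- ===== SOURCE A (Python) =====
-- def sanitized_passwd(word):
--     letter_count = {}
--     result = []
--
--     for letter in word:
--         if letter in letter_count:
--             letter_count[letter] += 1
--             result.append(f"{letter}{letter_count[letter]},")
--         else:
--             letter_count[letter] = 0
--             result.append(f"{letter},")
--
--     if result:
--         result[-1] = result[-1].rstrip(',')
--
--     return ''.join(result).upper()
-- ===== SOURCE B (Python) =====
-- def sanitized_passwd(word):
--     labels = [""] * len(word)
--     for letter in dict.fromkeys(word):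
--         k = 0
--         for i, ch in enumerate(word):
--             if ch == letter:
--                 labels[i] = letter if k == 0 else f"{letter}{k}"
--                 k += 1
--     return ",".join(labels).upper()
-- ===== Notes on version B (the rewrite author's own statement) =====
-- stated objective: alternative
-- what changed: Replaces A's single forward pass with a running-count dict, per-token trailing commas and final rstrip by a per-letter scatter: for each distinct letter (dict.fromkeys order) a dedicated scan numbers only that letter's occurrences and writes its tokens into a preallocated labels list, joined with ',' at the end.
-- intended difference: On words whose last character is a comma that occurs nowhere earlier, A's rstrip strips that final comma letter together with the separator so it vanishes from the output, while B keeps the word's final comma as its own token; keeping the final letter is the intended behaviour of a disambiguation routine. — e.g. on sanitized_passwd(","): A returns "", B returns ","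
import Mathlib
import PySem

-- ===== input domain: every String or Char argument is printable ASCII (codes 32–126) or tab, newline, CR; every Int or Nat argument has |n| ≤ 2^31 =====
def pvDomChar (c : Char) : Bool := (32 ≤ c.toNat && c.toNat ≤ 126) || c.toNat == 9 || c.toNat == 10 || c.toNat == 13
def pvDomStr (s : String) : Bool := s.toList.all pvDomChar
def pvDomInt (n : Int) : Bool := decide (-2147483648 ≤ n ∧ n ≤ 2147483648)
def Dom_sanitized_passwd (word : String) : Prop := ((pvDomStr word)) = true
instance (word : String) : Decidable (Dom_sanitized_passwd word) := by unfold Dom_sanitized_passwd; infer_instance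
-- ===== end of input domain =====

-- B replaces A's forward pass (running-count dict, trailing commas, final rstrip) by a per-letter scatter
-- into a preallocated labels list (objective: alternative); on a word ending in a first-occurrence comma
-- A's rstrip eats the letter, B keeps it (see D_).

-- ===== PORT A =====
-- exact port of str.rstrip(','): drop trailing ',' characters
def pvRstripComma (cs : List Char) : List Char :=
  (cs.reverse.dropWhile (fun c => c == ',')).reverse

-- the loop body: dict of letter counts so far (first occurrence stored as 0), list of tokens (each with its trailing ',')
def pvStepA (p : PySem.Dict Char Int × List (List Char)) (letter : Char) :
    PySem.Dict Char Int × List (List Char) :=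
  let lc := p.1
  let result := p.2
  if lc.contains letter then
    -- letter_count[letter] += 1 ; result.append(f"{letter}{letter_count[letter]},")
    let lc' := lc.insert letter (lc.getD letter 0 + 1)
    (lc', result ++ [[letter] ++ (PySem.Int.toStr (lc'.getD letter 0)).toList ++ [',']])
  else
    -- letter_count[letter] = 0 ; result.append(f"{letter},")
    (lc.insert letter 0, result ++ [[letter] ++ [',']])

def sanitized_passwd (word : String) : String :=
  let st := word.toList.foldl pvStepA (PySem.Dict.empty, [])
  let result := st.2
  -- if result: result[-1] = result[-1].rstrip(',')
  let result := if result.isEmpty then result else result.dropLast ++ [pvRstripComma (result.getLastD [])]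
  String.ofList (PySem.Chars.upper (PySem.Chars.join [] result))   -- ''.join(result).upper()

-- ===== PORT B =====
-- the token written for the k-th occurrence (0-based) of letter: `letter if k == 0 else f"{letter}{k}"`
def pvTokB (letter : Char) (k : Int) : List Char :=
  if k = 0 then [letter] else [letter] ++ (PySem.Int.toStr k).toList

-- the inner loop body over (i, ch): `if ch == letter: labels[i] = …; k += 1`
def pvStepB (letter : Char) (st : List (List Char) × Int) (ic : Int × Char) :
    List (List Char) × Int :=
  if ic.2 == letter then (PySem.List.pySetD st.1 ic.1 (pvTokB letter st.2), st.2 + 1) else st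

-- one outer iteration: scan the whole word, numbering only `letter`'s occurrences
def pvMark (cs : List Char) (labels : List (List Char)) (letter : Char) : List (List Char) :=
  ((PySem.List.enumerate cs 0).foldl (pvStepB letter) (labels, 0)).1

def sanitized_passwd_alt (word : String) : String :=
  let cs := word.toList
  -- labels = [""] * len(word); for letter in dict.fromkeys(word): …scatter…
  let labels := (PySem.List.dedup cs).foldl (pvMark cs) (List.replicate cs.length [])
  String.ofList (PySem.Chars.upper (PySem.Chars.join [','] labels))   -- ",".join(labels).upper()

-- ===== PRECONDITION & SPEC =====
-- On words whose last character is a comma that occurs nowhere earlier, A's rstrip strips that final comma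
-- letter together with the separator so it vanishes from the output, while B keeps the word's final comma as
-- its own token; keeping the final letter is the intended behaviour of a disambiguation routine.
def D_sanitized_passwd (word : String) : Prop :=
  word.toList.getLast? = some ',' ∧ word.toList.count ',' = 1
instance (word : String) : Decidable (D_sanitized_passwd word) := by unfold D_sanitized_passwd; infer_instance

def Spec_sanitized_passwd (word : String) (out : String) : Prop :=
  ¬ D_sanitized_passwd word → out = sanitized_passwd_alt word
instance (word : String) (out : String) : Decidable (Spec_sanitized_passwd word out) := by
  unfold Spec_sanitized_passwd; infer_instance

def pvDiffWitness_sanitized_passwd : String := ","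
def pvDiffWitnessOut_sanitized_passwd : String × String := ("", ",")

-- ===== CLAIM (what is proved, stated in full; the proofs are below) =====
def Claim_unchanged_sanitized_passwd : Prop :=
  ∀ (word : String), Dom_sanitized_passwd word → Spec_sanitized_passwd word (sanitized_passwd word)
def Claim_changed_sanitized_passwd : Prop :=
  Dom_sanitized_passwd (pvDiffWitness_sanitized_passwd) ∧
  D_sanitized_passwd (pvDiffWitness_sanitized_passwd) ∧
  sanitized_passwd (pvDiffWitness_sanitized_passwd) = pvDiffWitnessOut_sanitized_passwd.1 ∧
  sanitized_passwd_alt (pvDiffWitness_sanitized_passwd) = pvDiffWitnessOut_sanitized_passwd.2 ∧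
  pvDiffWitnessOut_sanitized_passwd.1 ≠ pvDiffWitnessOut_sanitized_passwd.2
def Claim_exact_sanitized_passwd : Prop :=
  ∀ (word : String), Dom_sanitized_passwd word → D_sanitized_passwd word →
    sanitized_passwd word ≠ sanitized_passwd_alt word

-- ===== LEMMAS AND PROOFS =====

-- the token both programs build for letter l arriving after prefix pre (without A's trailing ',')
def pvTok (pre : List Char) (l : Char) : List Char :=
  if pre.count l = 0 then [l] else [l] ++ (PySem.Int.toStr (pre.count l : Int)).toList

def pvToks : List Char → List Char → List (List Char)
  | _, [] => []
  | pre, l :: rest => pvTok pre l :: pvToks (pre ++ [l]) rest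

-- A's loop produces exactly pvToks with a ',' appended to every token
lemma pv_loopA : ∀ (rest pre : List Char) (d : PySem.Dict Char Int) (res : List (List Char)),
    (∀ c, d.contains c = decide (0 < pre.count c)) →
    (∀ c, 0 < pre.count c → d.getD c 0 = (pre.count c : Int) - 1) →
    (rest.foldl pvStepA (d, res)).2 = res ++ (pvToks pre rest).map (· ++ [',']) := by
  intro rest
  induction rest with
  | nil => intro pre d res _ _; simp [pvToks]
  | cons l rest ih =>
    intro pre d res hc hg
    simp only [List.foldl_cons]
    by_cases h : 0 < pre.count l
    · have hcl : d.contains l = true := by rw [hc]; simpa using h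
      have hgl : d.getD l 0 = (pre.count l : Int) - 1 := hg l h
      have hstep : pvStepA (d, res) l =
          (d.insert l ((pre.count l : Int)),
           res ++ [[l] ++ (PySem.Int.toStr (pre.count l : Int)).toList ++ [',']]) := by
        simp [pvStepA, hcl, hgl]
      rw [hstep]
      rw [ih (pre ++ [l]) _ _ ?_ ?_]
      · have htok : pvTok pre l = [l] ++ (PySem.Int.toStr (pre.count l : Int)).toList := by
          simp [pvTok, Nat.pos_iff_ne_zero.mp h]
        simp [pvToks, htok]
      · intro c
        rw [PySem.Dict.contains_insert, hc]
        by_cases hcl' : c = l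
        · subst hcl'; simp [List.count_append]
        · have h2 : List.count c [l] = 0 := by
            rw [List.count_eq_zero]; simp [hcl']
          simp [List.count_append, h2, hcl']
      · intro c hc'
        rw [PySem.Dict.getD_insert]
        by_cases hcl' : c = l
        · subst hcl'
          have h1 : List.count c (pre ++ [c]) = List.count c pre + 1 := by
            simp [List.count_append]
          rw [if_pos rfl, h1]
          push_cast
          ring
        · have h2 : List.count c [l] = 0 := by
            rw [List.count_eq_zero]; simp [hcl']
          have h1 : List.count c (pre ++ [l]) = List.count c pre := by
            simp [List.count_append, h2]
          rw [if_neg hcl', h1]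
          exact hg c (by rwa [h1] at hc')
    · have hcl : d.contains l = false := by rw [hc]; simpa using h
      have hstep : pvStepA (d, res) l = (d.insert l 0, res ++ [[l] ++ [',']]) := by
        simp [pvStepA, hcl]
      rw [hstep]
      rw [ih (pre ++ [l]) _ _ ?_ ?_]
      · have htok : pvTok pre l = [l] := by
          simp [pvTok, Nat.eq_zero_of_not_pos h]
        simp [pvToks, htok]
      · intro c
        rw [PySem.Dict.contains_insert, hc]
        by_cases hcl' : c = l
        · subst hcl'; simp [List.count_append]
        · have h2 : List.count c [l] = 0 := by
            rw [List.count_eq_zero]; simp [hcl']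
          simp [List.count_append, h2, hcl']
      · intro c hc'
        rw [PySem.Dict.getD_insert]
        by_cases hcl' : c = l
        · subst hcl'
          have h0 : List.count c pre = 0 := Nat.eq_zero_of_not_pos h
          have h1 : List.count c (pre ++ [c]) = 1 := by
            simp [List.count_append, h0]
          rw [if_pos rfl, h1]
          push_cast
        · have h2 : List.count c [l] = 0 := by
            rw [List.count_eq_zero]; simp [hcl']
          have h1 : List.count c (pre ++ [l]) = List.count c pre := by
            simp [List.count_append, h2]
          rw [if_neg hcl', h1]
          exact hg c (by rwa [h1] at hc')

-- B's inner scan: numbers the occurrences of c at their positions, leaves everything else alone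
lemma pv_innerB (c : Char) : ∀ (rest : List Char) (j k : Nat) (labels : List (List Char)),
    j + rest.length ≤ labels.length →
    ((PySem.List.enumerate rest (j : Int)).foldl (pvStepB c) (labels, (k : Int))).2
        = ((k + rest.count c : Nat) : Int) ∧
    ((PySem.List.enumerate rest (j : Int)).foldl (pvStepB c) (labels, (k : Int))).1.length
        = labels.length ∧
    ∀ i, i < labels.length →
      ((PySem.List.enumerate rest (j : Int)).foldl (pvStepB c) (labels, (k : Int))).1[i]?
        = if j ≤ i ∧ rest[i - j]? = some c
          then some (pvTokB c ((k + ((rest.take (i - j)).count c) : Nat)))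
          else labels[i]? := by
  intro rest
  induction rest with
  | nil =>
    intro j k labels hlen
    refine ⟨by simp [PySem.List.enumerate], by simp [PySem.List.enumerate], ?_⟩
    intro i _
    simp [PySem.List.enumerate]
  | cons l rest ih =>
    intro j k labels hlen
    have hjlt : j < labels.length := by simp at hlen; omega
    rw [PySem.List.enumerate_cons]
    simp only [List.foldl_cons]
    by_cases hlc : l = c
    · subst hlc
      have hstep : pvStepB l (labels, (k : Int)) ((j : Int), l)
          = (labels.set j (pvTokB l (k : Int)), ((k + 1 : Nat) : Int)) := by
        simp [pvStepB, PySem.List.pySetD_natCast]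
      rw [hstep]
      have hcast : ((j : Int) + 1) = ((j + 1 : Nat) : Int) := by push_cast; ring
      rw [hcast]
      have hlen' : (j + 1) + rest.length ≤ (labels.set j (pvTokB l (k : Int))).length := by
        simp at hlen ⊢; omega
      obtain ⟨h2, h1, hpt⟩ := ih (j + 1) (k + 1) _ hlen'
      refine ⟨by rw [h2]; push_cast; simp; ring, by rw [h1]; simp, ?_⟩
      intro i hi
      rw [hpt i (by simpa using hi)]
      rcases lt_trichotomy i j with hij | hij | hij
      · have c1 : ¬ (j + 1 ≤ i ∧ rest[i - (j + 1)]? = some l) := by omega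
        have c2 : ¬ (j ≤ i ∧ (l :: rest)[i - j]? = some l) := by omega
        rw [if_neg c1, if_neg c2, List.getElem?_set_ne (by omega)]
      · subst hij
        have c1 : ¬ (i + 1 ≤ i ∧ rest[i - (i + 1)]? = some l) := by omega
        have c2 : (i ≤ i ∧ (l :: rest)[i - i]? = some l) := by simp
        rw [if_neg c1, if_pos c2, List.getElem?_set_self hjlt]
        simp
      · have hd : i - j = (i - (j + 1)) + 1 := by omega
        have hge : (l :: rest)[i - j]? = rest[i - (j + 1)]? := by
          rw [hd]; simp
        have htk : ((l :: rest).take (i - j)).count l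
            = (rest.take (i - (j + 1))).count l + 1 := by
          rw [hd, List.take_succ_cons, List.count_cons_self]
        by_cases hcnd : rest[i - (j + 1)]? = some l
        · have c1 : (j + 1 ≤ i ∧ rest[i - (j + 1)]? = some l) := ⟨by omega, hcnd⟩
          have c2 : (j ≤ i ∧ (l :: rest)[i - j]? = some l) := ⟨by omega, by rw [hge]; exact hcnd⟩
          rw [if_pos c1, if_pos c2, htk]
          congr 2
          omega
        · have c1 : ¬ (j + 1 ≤ i ∧ rest[i - (j + 1)]? = some l) := by
            rintro ⟨_, h⟩; exact hcnd h
          have c2 : ¬ (j ≤ i ∧ (l :: rest)[i - j]? = some l) := by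
            rintro ⟨_, h⟩; rw [hge] at h; exact hcnd h
          rw [if_neg c1, if_neg c2, List.getElem?_set_ne (by omega)]
    · have hb : (l == c) = false := by simp [hlc]
      have hstep : pvStepB c (labels, (k : Int)) ((j : Int), l) = (labels, (k : Int)) := by
        simp [pvStepB, hb]
      rw [hstep]
      have hcast : ((j : Int) + 1) = ((j + 1 : Nat) : Int) := by push_cast; ring
      rw [hcast]
      have hlen' : (j + 1) + rest.length ≤ labels.length := by simp at hlen ⊢; omega
      obtain ⟨h2, h1, hpt⟩ := ih (j + 1) k _ hlen'
      refine ⟨by rw [h2]; simp [hlc], h1, ?_⟩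
      intro i hi
      rw [hpt i hi]
      rcases lt_trichotomy i j with hij | hij | hij
      · have c1 : ¬ (j + 1 ≤ i ∧ rest[i - (j + 1)]? = some c) := by omega
        have c2 : ¬ (j ≤ i ∧ (l :: rest)[i - j]? = some c) := by omega
        rw [if_neg c1, if_neg c2]
      · subst hij
        have c1 : ¬ (i + 1 ≤ i ∧ rest[i - (i + 1)]? = some c) := by omega
        have c2 : ¬ (i ≤ i ∧ (l :: rest)[i - i]? = some c) := by
          rintro ⟨_, h⟩; simp at h; exact hlc h
        rw [if_neg c1, if_neg c2]
      · have hd : i - j = (i - (j + 1)) + 1 := by omega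
        have hge : (l :: rest)[i - j]? = rest[i - (j + 1)]? := by
          rw [hd]; simp
        have htk : ((l :: rest).take (i - j)).count c
            = (rest.take (i - (j + 1))).count c := by
          rw [hd, List.take_succ_cons, List.count_cons_of_ne hlc]
        by_cases hcnd : rest[i - (j + 1)]? = some c
        · have c1 : (j + 1 ≤ i ∧ rest[i - (j + 1)]? = some c) := ⟨by omega, hcnd⟩
          have c2 : (j ≤ i ∧ (l :: rest)[i - j]? = some c) := ⟨by omega, by rw [hge]; exact hcnd⟩
          rw [if_pos c1, if_pos c2, htk]
        · have c1 : ¬ (j + 1 ≤ i ∧ rest[i - (j + 1)]? = some c) := by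
            rintro ⟨_, h⟩; exact hcnd h
          have c2 : ¬ (j ≤ i ∧ (l :: rest)[i - j]? = some c) := by
            rintro ⟨_, h⟩; rw [hge] at h; exact hcnd h
          rw [if_neg c1, if_neg c2]

-- pvTokB at the prefix count is pvTok
lemma pv_tokB_eq (pre : List Char) (l : Char) :
    pvTokB l ((pre.count l : Nat) : Int) = pvTok pre l := by
  unfold pvTokB pvTok
  by_cases h : pre.count l = 0
  · simp [h]
  · have : ((pre.count l : Nat) : Int) ≠ 0 := by exact_mod_cast h
    simp [h]

-- one outer pass rewrites exactly the positions of its letter with the right token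
lemma pv_markB (cs : List Char) (c : Char) (labels : List (List Char))
    (hlen : labels.length = cs.length) :
    (pvMark cs labels c).length = cs.length ∧
    ∀ i, i < cs.length →
      (pvMark cs labels c)[i]? =
        if cs[i]? = some c then some (pvTok (cs.take i) c) else labels[i]? := by
  obtain ⟨_, h1, hpt⟩ := pv_innerB c cs 0 0 labels (by omega)
  simp only [Nat.cast_zero] at h1 hpt
  refine ⟨by unfold pvMark; rw [h1, hlen], ?_⟩
  intro i hi
  have := hpt i (by omega)
  unfold pvMark
  rw [this]
  simp only [Nat.sub_zero, Nat.zero_add, true_and, Nat.zero_le]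
  by_cases h : cs[i]? = some c
  · rw [if_pos h, if_pos h, pv_tokB_eq]
  · rw [if_neg h, if_neg h]

-- the outer fold marks exactly the positions whose letter is in the processed list
lemma pv_outerB (cs : List Char) : ∀ (S : List Char) (labels : List (List Char)),
    labels.length = cs.length →
    (S.foldl (pvMark cs) labels).length = cs.length ∧
    ∀ i (hi : i < cs.length),
      (S.foldl (pvMark cs) labels)[i]? =
        if cs[i] ∈ S then some (pvTok (cs.take i) cs[i]) else labels[i]? := by
  intro S
  induction S with
  | nil => intro labels hlen; exact ⟨hlen, fun i hi => by simp⟩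
  | cons c S ih =>
    intro labels hlen
    obtain ⟨hl1, hm⟩ := pv_markB cs c labels hlen
    obtain ⟨hl2, hpt⟩ := ih (pvMark cs labels c) hl1
    refine ⟨by simpa using hl2, ?_⟩
    intro i hi
    rw [List.foldl_cons, hpt i hi]
    by_cases hS : cs[i] ∈ S
    · rw [if_pos hS, if_pos (by simp [hS])]
    · rw [if_neg hS, hm i hi]
      by_cases hc : cs[i] = c
      · have : cs[i]? = some c := by rw [List.getElem?_eq_getElem hi, hc]
        rw [if_pos this, if_pos (by simp [hc]), hc]
      · have : ¬ cs[i]? = some c := by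
          rw [List.getElem?_eq_getElem hi]; simpa using hc
        rw [if_neg this, if_neg (by simp [hS, hc])]

-- pvToks, element by element
lemma pv_toks_getElem? : ∀ (rest pre : List Char),
    (pvToks pre rest).length = rest.length ∧
    ∀ i (hi : i < rest.length),
      (pvToks pre rest)[i]? = some (pvTok (pre ++ rest.take i) rest[i]) := by
  intro rest
  induction rest with
  | nil => intro pre; exact ⟨rfl, fun i hi => by simp at hi⟩
  | cons l rest ih =>
    intro pre
    refine ⟨by simp [pvToks, (ih (pre ++ [l])).1], ?_⟩
    intro i hi
    cases i with
    | zero => simp [pvToks]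
    | succ i =>
      have := (ih (pre ++ [l])).2 i (by simpa using hi)
      simp only [pvToks, List.getElem?_cons_succ, this, List.take_succ_cons,
        List.getElem_cons_succ]
      rw [List.append_assoc]
      simp

-- B's labels list is exactly pvToks
lemma pv_labelsB (cs : List Char) :
    (PySem.List.dedup cs).foldl (pvMark cs) (List.replicate cs.length []) = pvToks [] cs := by
  obtain ⟨hl, hpt⟩ := pv_outerB cs (PySem.List.dedup cs) (List.replicate cs.length [])
    (by simp)
  obtain ⟨hl', hpt'⟩ := pv_toks_getElem? cs []
  apply List.ext_getElem?
  intro i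
  by_cases hi : i < cs.length
  · rw [hpt i hi, hpt' i hi]
    rw [if_pos (by rw [PySem.List.mem_dedup]; exact List.getElem_mem hi)]
    simp
  · rw [List.getElem?_eq_none (by omega), List.getElem?_eq_none (by omega)]

lemma pv_join_map_comma : ∀ (init : List (List Char)) (b : List Char),
    (init.map (· ++ [','])).flatten ++ b = PySem.Chars.join [','] (init ++ [b]) := by
  intro init
  induction init with
  | nil => intro b; simp [PySem.Chars.join_singleton]
  | cons a t ih =>
    intro b
    have : t ++ [b] = (t ++ [b]).head! :: (t ++ [b]).tail := by
      cases t <;> simp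
    calc ((a :: t).map (· ++ [','])).flatten ++ b
        = a ++ [','] ++ ((t.map (· ++ [','])).flatten ++ b) := by simp
      _ = a ++ [','] ++ PySem.Chars.join [','] (t ++ [b]) := by rw [ih]
      _ = PySem.Chars.join [','] (a :: (t ++ [b])) := by
            rw [this, PySem.Chars.join_cons_cons]

lemma pv_rstrip_append (b : List Char) (h : b.getLast? ≠ some ',') :
    pvRstripComma (b ++ [',']) = b := by
  unfold pvRstripComma
  rw [List.reverse_append]
  simp only [List.reverse_cons, List.reverse_nil, List.nil_append, List.singleton_append,
    List.dropWhile_cons]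
  simp only [beq_self_eq_true, if_true]
  cases hb : b.reverse with
  | nil => simpa using congrArg List.reverse hb
  | cons x xs =>
    have hl : b.getLast? = some x := by
      rw [← List.head?_reverse, hb]; rfl
    have hxc : (x == ',') = false := by
      simp only [beq_eq_false_iff_ne, ne_eq]
      intro hxy; exact h (by rw [hl, hxy])
    simp only [List.dropWhile_cons, hxc, if_false, Bool.false_eq_true]
    rw [← hb, List.reverse_reverse]

lemma pv_digitChar_ne_comma (m : Nat) (hm : m < 10) : Nat.digitChar m ≠ ',' := by
  interval_cases m <;> decide

lemma pv_comma_not_mem_toDigitsCore :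
    ∀ (f n : Nat) (acc : List Char), ',' ∉ acc → ',' ∉ Nat.toDigitsCore 10 f n acc := by
  intro f
  induction f with
  | zero => intro n acc hacc; simpa [Nat.toDigitsCore] using hacc
  | succ f ih =>
    intro n acc hacc
    have hd : ',' ∉ (Nat.digitChar (n % 10) :: acc) := by
      intro hmem
      rcases List.mem_cons.mp hmem with hx | hx
      · exact pv_digitChar_ne_comma (n % 10) (Nat.mod_lt _ (by norm_num)) hx.symm
      · exact hacc hx
    have hgo : Nat.toDigitsCore 10 (f + 1) n acc =
        if n / 10 = 0 then Nat.digitChar (n % 10) :: acc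
        else Nat.toDigitsCore 10 f (n / 10) (Nat.digitChar (n % 10) :: acc) := by
      simp [Nat.toDigitsCore]
    rw [hgo]
    by_cases h0 : n / 10 = 0
    · simpa [h0] using hd
    · simpa [h0] using ih (n / 10) _ hd

lemma pv_comma_not_mem_toDigits (n : Nat) : ',' ∉ Nat.toDigits 10 n := by
  exact pv_comma_not_mem_toDigitsCore (n + 1) n [] (by simp)

lemma pv_join_nil_sep : ∀ xs : List (List Char), PySem.Chars.join [] xs = xs.flatten := by
  intro xs
  induction xs with
  | nil => simp [PySem.Chars.join_nil]
  | cons a t ih =>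
    cases t with
    | nil => simp [PySem.Chars.join_singleton]
    | cons b r =>
      rw [PySem.Chars.join_cons_cons, ih]
      simp

lemma pv_toDigitsCore_ne_nil_of_acc :
    ∀ (f n : Nat) (acc : List Char), acc ≠ [] → Nat.toDigitsCore 10 f n acc ≠ [] := by
  intro f
  induction f with
  | zero => intro n acc h; simpa [Nat.toDigitsCore] using h
  | succ f ih =>
    intro n acc h
    have hgo : Nat.toDigitsCore 10 (f + 1) n acc =
        if n / 10 = 0 then Nat.digitChar (n % 10) :: acc
        else Nat.toDigitsCore 10 f (n / 10) (Nat.digitChar (n % 10) :: acc) := by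
      simp [Nat.toDigitsCore]
    rw [hgo]
    by_cases h0 : n / 10 = 0
    · simp [h0]
    · simpa [h0] using ih (n / 10) _ (by simp)

lemma pv_toDigits_ne_nil (n : Nat) : Nat.toDigits 10 n ≠ [] := by
  show Nat.toDigitsCore 10 (n + 1) n [] ≠ []
  have hgo : Nat.toDigitsCore 10 (n + 1) n [] =
      if n / 10 = 0 then Nat.digitChar (n % 10) :: []
      else Nat.toDigitsCore 10 n (n / 10) (Nat.digitChar (n % 10) :: []) := by
    simp [Nat.toDigitsCore]
  rw [hgo]
  by_cases h0 : n / 10 = 0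
  · simp [h0]
  · simpa [h0] using pv_toDigitsCore_ne_nil_of_acc n (n / 10) _ (by simp)

lemma pv_join_concat_append : ∀ (xs : List (List Char)) (b e : List Char),
    PySem.Chars.join [','] (xs ++ [b ++ e]) = PySem.Chars.join [','] (xs ++ [b]) ++ e := by
  intro xs
  induction xs with
  | nil => intro b e; simp [PySem.Chars.join_singleton]
  | cons a t ih =>
    intro b e
    have h1 : t ++ [b ++ e] = (t ++ [b ++ e]).head! :: (t ++ [b ++ e]).tail := by
      cases t <;> simp
    have h2 : t ++ [b] = (t ++ [b]).head! :: (t ++ [b]).tail := by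
      cases t <;> simp
    calc PySem.Chars.join [','] (a :: t ++ [b ++ e])
        = a ++ [','] ++ PySem.Chars.join [','] (t ++ [b ++ e]) := by
          rw [List.cons_append, h1, PySem.Chars.join_cons_cons, ← h1]
      _ = a ++ [','] ++ (PySem.Chars.join [','] (t ++ [b]) ++ e) := by rw [ih b e]
      _ = (a ++ [','] ++ PySem.Chars.join [','] (t ++ [b])) ++ e := by
          simp [List.append_assoc]
      _ = PySem.Chars.join [','] (a :: t ++ [b]) ++ e := by
          rw [List.cons_append, h2, PySem.Chars.join_cons_cons, ← h2]

-- zeta-reduced body of the port of A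
lemma pv_A_def (word : String) :
    sanitized_passwd word =
      String.ofList (PySem.Chars.upper (PySem.Chars.join []
        (if ((word.toList.foldl pvStepA (PySem.Dict.empty, [])).2).isEmpty
         then (word.toList.foldl pvStepA (PySem.Dict.empty, [])).2
         else ((word.toList.foldl pvStepA (PySem.Dict.empty, [])).2).dropLast ++
              [pvRstripComma (((word.toList.foldl pvStepA (PySem.Dict.empty, [])).2).getLastD [])]))) := rfl

lemma pv_A_result (word : String) :
    (word.toList.foldl pvStepA (PySem.Dict.empty, [])).2 =
      (pvToks [] word.toList).map (· ++ [',']) := by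
  have h := pv_loopA word.toList [] PySem.Dict.empty []
    (fun c => by simp [PySem.Dict.contains_empty])
    (fun c hc => by simp at hc)
  simpa using h

lemma pv_B_chars (word : String) :
    sanitized_passwd_alt word =
      String.ofList (PySem.Chars.upper (PySem.Chars.join [','] (pvToks [] word.toList))) := by
  show String.ofList (PySem.Chars.upper (PySem.Chars.join [',']
    ((PySem.List.dedup word.toList).foldl (pvMark word.toList)
      (List.replicate word.toList.length [])))) = _
  rw [pv_labelsB]

-- the last token never ends in ',' outside D_
lemma pv_last_tok (word : String) (init : List Char) (l : Char)
    (hcs : word.toList = init ++ [l]) (hD : ¬ D_sanitized_passwd word) :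
    (pvTok init l).getLast? ≠ some ',' := by
  intro hcon
  by_cases h0 : init.count l = 0
  · have hb : pvTok init l = [l] := by simp [pvTok, h0]
    rw [hb] at hcon
    have hl : l = ',' := by simpa using hcon
    subst hl
    apply hD
    constructor
    · rw [hcs, List.getLast?_concat]
    · rw [hcs, List.count_append]
      simp [h0]
  · have hb : pvTok init l = [l] ++ (PySem.Int.toStr (init.count l : Int)).toList := by
      simp [pvTok, h0]
    have hdig : (PySem.Int.toStr (init.count l : Int)).toList = Nat.toDigits 10 (init.count l) := by
      rw [PySem.Int.toList_toStr]
      simp [PySem.Int.toChars]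
    have hne2 : Nat.toDigits 10 (init.count l) ≠ [] := pv_toDigits_ne_nil _
    have hlast2 : (pvTok init l).getLast? = (Nat.toDigits 10 (init.count l)).getLast? := by
      rw [hb, hdig, List.getLast?_append_of_ne_nil _ hne2]
    rw [hlast2] at hcon
    exact pv_comma_not_mem_toDigits _ (List.mem_of_getLast? hcon)

-- ===== VERDICT (by name: the statement is the Claim_ definition above) =====
theorem sanitized_passwd_spec : Claim_unchanged_sanitized_passwd := by
  intro word _ hD
  rw [pv_A_def word, pv_A_result word, pv_B_chars word]
  rcases List.eq_nil_or_concat word.toList with hnil | ⟨init, l, hcs⟩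
  · rw [hnil]; simp [pvToks, PySem.Chars.join_nil]
  · rw [List.concat_eq_append] at hcs
    rw [hcs]
    have htoks : pvToks [] (init ++ [l]) = pvToks [] init ++ [pvTok init l] := by
      have : ∀ (init2 pre : List Char) (l2 : Char),
          pvToks pre (init2 ++ [l2]) = pvToks pre init2 ++ [pvTok (pre ++ init2) l2] := by
        intro init2
        induction init2 with
        | nil => intro pre l2; simp [pvToks]
        | cons x t ih =>
          intro pre l2
          simp only [List.cons_append, pvToks, ih (pre ++ [x]) l2, List.append_assoc]
          simp
      simpa using this init [] l
    rw [htoks]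
    have hmap : ((pvToks [] init ++ [pvTok init l]).map (· ++ [','])) =
        (pvToks [] init).map (· ++ [',']) ++ [pvTok init l ++ [',']] := by simp
    rw [hmap]
    have hne : ((pvToks [] init).map (· ++ [',']) ++ [pvTok init l ++ [',']]).isEmpty = false := by
      simp
    rw [hne]
    simp only [Bool.false_eq_true, if_false, List.dropLast_concat, List.getLastD_concat]
    rw [pv_rstrip_append (pvTok init l) (pv_last_tok word init l hcs hD)]
    rw [pv_join_nil_sep, List.flatten_append]
    simp only [List.flatten_cons, List.flatten_nil, List.append_nil]
    rw [pv_join_map_comma]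

theorem sanitized_passwd_changed : Claim_changed_sanitized_passwd := by
  unfold Claim_changed_sanitized_passwd; decide

theorem sanitized_passwd_tight : Claim_exact_sanitized_passwd := by
  intro word _ hD
  obtain ⟨hlast, hcount⟩ := hD
  rcases List.eq_nil_or_concat word.toList with hnil | ⟨init, l, hcs⟩
  · rw [hnil] at hlast; simp at hlast
  · rw [List.concat_eq_append] at hcs
    rw [hcs] at hlast hcount
    rw [List.getLast?_concat] at hlast
    have hl : l = ',' := by simpa using hlast
    subst hl
    have h0 : init.count ',' = 0 := by
      rw [List.count_append] at hcount
      simpa using hcount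
    rw [pv_A_def word, pv_A_result word, pv_B_chars word, hcs]
    have htoks : pvToks [] (init ++ [',']) = pvToks [] init ++ [pvTok init ','] := by
      have : ∀ (init2 pre : List Char) (l2 : Char),
          pvToks pre (init2 ++ [l2]) = pvToks pre init2 ++ [pvTok (pre ++ init2) l2] := by
        intro init2
        induction init2 with
        | nil => intro pre l2; simp [pvToks]
        | cons x t ih =>
          intro pre l2
          simp only [List.cons_append, pvToks, ih (pre ++ [x]) l2, List.append_assoc]
          simp
      simpa using this init [] ','
    rw [htoks]
    have hb : pvTok init ',' = [','] := by simp [pvTok, h0]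
    rw [hb]
    have hmap : ((pvToks [] init ++ [[',']]).map (· ++ [','])) =
        (pvToks [] init).map (· ++ [',']) ++ [[','] ++ [',']] := by simp
    rw [hmap]
    have hne : ((pvToks [] init).map (· ++ [',']) ++ [[','] ++ [',']]).isEmpty = false := by
      simp
    rw [hne]
    simp only [Bool.false_eq_true, if_false, List.dropLast_concat, List.getLastD_concat]
    have hrs : pvRstripComma ([','] ++ [',']) = [] := rfl
    rw [hrs]
    rw [pv_join_nil_sep, List.flatten_append]
    have hjoin : (List.map (fun x => x ++ [',']) (pvToks [] init)).flatten
        = PySem.Chars.join [','] (pvToks [] init ++ [[]]) := by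
      simpa using pv_join_map_comma (pvToks [] init) []
    simp only [List.flatten_cons, List.flatten_nil, List.append_nil]
    rw [hjoin]
    have hB : PySem.Chars.join [','] (pvToks [] init ++ [[',']]) =
        PySem.Chars.join [','] (pvToks [] init ++ [[]]) ++ [','] := by
      simpa using pv_join_concat_append (pvToks [] init) [] [',']
    rw [hB]
    intro heq
    have h2 := congrArg (fun s => s.toList.length) heq
    simp only [String.toList_ofList, PySem.Chars.upper, List.length_map,
      List.length_append, List.length_cons, List.length_nil] at h2
    omega
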